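-- pv_equiv track=rewrite | github.com/workofhaseeb-cyber/jarvis | server.py | detect_action_fast
-- ===== SOURCE A (Python) =====
-- def detect_action_fast(text: str) -> dict | None:
--     """Keyword-based action detection — ONLY for short, obvious commands.
--
--     Everything else goes to the LLM which uses [ACTION:X] tags when it decides
--     to act based on conversational understanding.
--     """
--     t = text.lower().strip()
--     words = t.split()
--
--     # Only trigger on SHORT, clear commands (< 12 words)
--     if len(words) > 12:
--         return None  # Long messages are conversation, not commands
--
--     # Screen requests — checked BEFORE project matching to prevent misrouting
--     if any(p in t for p in ["look at my screen", "what's on my screen", "whats on my screen",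
--                              "what am i looking at", "what do you see", "see my screen",
--                              "what's running on my", "whats running on my", "check my screen"]):
--         return {"action": "describe_screen"}
--
--     # Terminal / Claude Code — explicit open requests
--     if any(w in t for w in ["open claude", "start claude", "launch claude", "run claude"]):
--         return {"action": "open_terminal"}
--
--     # Show recent build
--     if any(w in t for w in ["show me what you built", "pull up what you made", "open what you built"]):
--         return {"action": "show_recent"}
--
--     # Screen awareness — explicit look/see requests
--     if any(p in t for p in ["what's on my screen", "whats on my screen", "what do you see",
--                              "can you see my screen", "look at my screen", "what am i looking at",
--                              "what's open", "whats open", "what apps are open"]):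
--         return {"action": "describe_screen"}
--
--     # Calendar — explicit schedule requests
--     if any(p in t for p in ["what's my schedule", "whats my schedule", "what's on my calendar",
--                              "whats on my calendar", "do i have any meetings", "any meetings",
--                              "what's next on my calendar", "my schedule today",
--                              "what do i have today", "my calendar", "upcoming meetings",
--                              "next meeting", "what's my next meeting"]):
--         return {"action": "check_calendar"}
--
--     # Mail — explicit email requests
--     if any(p in t for p in ["check my email", "check my mail", "any new emails", "any new mail",
--                              "unread emails", "unread mail", "what's in my inbox",
--                              "whats in my inbox", "read my email", "read my mail",
--                              "any emails", "any mail", "email update", "mail update"]):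
--         return {"action": "check_mail"}
--
--     # Dispatch / build status check
--     if any(p in t for p in ["where are we", "where were we", "project status", "how's the build",
--                              "hows the build", "status update", "status report", "where is that",
--                              "how's it going with", "hows it going with", "is it done",
--                              "is that done", "what happened with"]):
--         return {"action": "check_dispatch"}
--
--     # Task list check
--     if any(p in t for p in ["what's on my list", "whats on my list", "my tasks", "my to do",
--                              "my todo", "what do i need to do", "open tasks", "task list"]):
--         return {"action": "check_tasks"}
--
--     # Usage / cost check
--     if any(p in t for p in ["usage", "how much have you cost", "how much am i spending",
--                              "what's the cost", "whats the cost", "api cost", "token usage",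
--                              "how expensive", "what's my bill"]):
--         return {"action": "check_usage"}
--
--     return None  # Everything else goes to the LLM for conversational routing
-- ===== SOURCE B (Python) =====
-- # Flat pattern->priority dict + min-priority selection: collects ALL matching patterns
-- # in one pass and picks the lowest-priority (earliest-block) one, instead of A's ordered
-- # first-match branch chain.  Same results; objective: alternative decomposition.
-- _PATTERN_PRIORITY = {
--     'look at my screen': 0,
--     "what's on my screen": 0,
--     'whats on my screen': 0,
--     'what am i looking at': 0,
--     'what do you see': 0,
--     'see my screen': 0,
--     "what's running on my": 0,
--     'whats running on my': 0,
--     'check my screen': 0,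
--     'open claude': 1,
--     'start claude': 1,
--     'launch claude': 1,
--     'run claude': 1,
--     'show me what you built': 2,
--     'pull up what you made': 2,
--     'open what you built': 2,
--     'can you see my screen': 3,
--     "what's open": 3,
--     'whats open': 3,
--     'what apps are open': 3,
--     "what's my schedule": 4,
--     'whats my schedule': 4,
--     "what's on my calendar": 4,
--     'whats on my calendar': 4,
--     'do i have any meetings': 4,
--     'any meetings': 4,
--     "what's next on my calendar": 4,
--     'my schedule today': 4,
--     'what do i have today': 4,
--     'my calendar': 4,
--     'upcoming meetings': 4,
--     'next meeting': 4,
--     "what's my next meeting": 4,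
--     'check my email': 5,
--     'check my mail': 5,
--     'any new emails': 5,
--     'any new mail': 5,
--     'unread emails': 5,
--     'unread mail': 5,
--     "what's in my inbox": 5,
--     'whats in my inbox': 5,
--     'read my email': 5,
--     'read my mail': 5,
--     'any emails': 5,
--     'any mail': 5,
--     'email update': 5,
--     'mail update': 5,
--     'where are we': 6,
--     'where were we': 6,
--     'project status': 6,
--     "how's the build": 6,
--     'hows the build': 6,
--     'status update': 6,
--     'status report': 6,
--     'where is that': 6,
--     "how's it going with": 6,
--     'hows it going with': 6,
--     'is it done': 6,
--     'is that done': 6,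
--     'what happened with': 6,
--     "what's on my list": 7,
--     'whats on my list': 7,
--     'my tasks': 7,
--     'my to do': 7,
--     'my todo': 7,
--     'what do i need to do': 7,
--     'open tasks': 7,
--     'task list': 7,
--     'usage': 8,
--     'how much have you cost': 8,
--     'how much am i spending': 8,
--     "what's the cost": 8,
--     'whats the cost': 8,
--     'api cost': 8,
--     'token usage': 8,
--     'how expensive': 8,
--     "what's my bill": 8,
-- }
-- _ACTIONS = ("describe_screen", "open_terminal", "show_recent", "describe_screen",
--             "check_calendar", "check_mail", "check_dispatch", "check_tasks", "check_usage")
--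
--
-- def detect_action_fast(text: str) -> dict | None:
--     t = text.lower().strip()
--     if len(t.split()) > 12:
--         return None
--     hits = [prio for pat, prio in _PATTERN_PRIORITY.items() if pat in t]
--     if not hits:
--         return None
--     return {"action": _ACTIONS[min(hits)]}
-- ===== Notes on version B (the rewrite author's own statement) =====
-- stated objective: alternative
-- what changed: Replaces A's ordered first-match if-chain with a flat pattern-to-priority dict: B collects the priorities of ALL matching patterns in one comprehension and selects the minimum, mapping it through an actions tuple.
import Mathlib
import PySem

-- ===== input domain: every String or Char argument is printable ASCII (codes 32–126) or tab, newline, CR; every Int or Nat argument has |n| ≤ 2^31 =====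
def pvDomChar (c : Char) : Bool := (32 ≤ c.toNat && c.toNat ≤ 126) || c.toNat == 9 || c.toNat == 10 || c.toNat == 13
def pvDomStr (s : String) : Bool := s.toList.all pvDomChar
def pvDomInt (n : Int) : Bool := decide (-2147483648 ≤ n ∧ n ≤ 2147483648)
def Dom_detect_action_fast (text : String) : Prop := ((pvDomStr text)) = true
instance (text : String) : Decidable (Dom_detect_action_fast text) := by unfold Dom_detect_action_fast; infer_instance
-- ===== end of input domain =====

-- B replaces A's ordered first-match branch chain by a flat pattern->priority map scanned once,
-- collecting ALL matching patterns and selecting the minimum priority (alternative decomposition, same cost).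


-- ===== PORT A =====
def detect_action_fast (text : String) : Option (List (String × String)) :=
  let t := PySem.Str.strip (PySem.Str.lower text)
  let words := PySem.Str.split₀ t
  if words.length > 12 then none
  else if (["look at my screen", "what's on my screen", "whats on my screen", "what am i looking at", "what do you see", "see my screen", "what's running on my", "whats running on my", "check my screen"]).any (fun p => PySem.Str.isIn p t) then some [("action", "describe_screen")]
  else if (["open claude", "start claude", "launch claude", "run claude"]).any (fun p => PySem.Str.isIn p t) then some [("action", "open_terminal")]
  else if (["show me what you built", "pull up what you made", "open what you built"]).any (fun p => PySem.Str.isIn p t) then some [("action", "show_recent")]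
  else if (["what's on my screen", "whats on my screen", "what do you see", "can you see my screen", "look at my screen", "what am i looking at", "what's open", "whats open", "what apps are open"]).any (fun p => PySem.Str.isIn p t) then some [("action", "describe_screen")]
  else if (["what's my schedule", "whats my schedule", "what's on my calendar", "whats on my calendar", "do i have any meetings", "any meetings", "what's next on my calendar", "my schedule today", "what do i have today", "my calendar", "upcoming meetings", "next meeting", "what's my next meeting"]).any (fun p => PySem.Str.isIn p t) then some [("action", "check_calendar")]
  else if (["check my email", "check my mail", "any new emails", "any new mail", "unread emails", "unread mail", "what's in my inbox", "whats in my inbox", "read my email", "read my mail", "any emails", "any mail", "email update", "mail update"]).any (fun p => PySem.Str.isIn p t) then some [("action", "check_mail")]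
  else if (["where are we", "where were we", "project status", "how's the build", "hows the build", "status update", "status report", "where is that", "how's it going with", "hows it going with", "is it done", "is that done", "what happened with"]).any (fun p => PySem.Str.isIn p t) then some [("action", "check_dispatch")]
  else if (["what's on my list", "whats on my list", "my tasks", "my to do", "my todo", "what do i need to do", "open tasks", "task list"]).any (fun p => PySem.Str.isIn p t) then some [("action", "check_tasks")]
  else if (["usage", "how much have you cost", "how much am i spending", "what's the cost", "whats the cost", "api cost", "token usage", "how expensive", "what's my bill"]).any (fun p => PySem.Str.isIn p t) then some [("action", "check_usage")]
  else none

-- ===== PORT B =====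
-- _PATTERN_PRIORITY: dict literal, pattern -> priority (index of its first block)
def pvPriority : List (String × Nat) :=
  [ ("look at my screen", 0),
    ("what's on my screen", 0),
    ("whats on my screen", 0),
    ("what am i looking at", 0),
    ("what do you see", 0),
    ("see my screen", 0),
    ("what's running on my", 0),
    ("whats running on my", 0),
    ("check my screen", 0),
    ("open claude", 1),
    ("start claude", 1),
    ("launch claude", 1),
    ("run claude", 1),
    ("show me what you built", 2),
    ("pull up what you made", 2),
    ("open what you built", 2),
    ("can you see my screen", 3),
    ("what's open", 3),
    ("whats open", 3),
    ("what apps are open", 3),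
    ("what's my schedule", 4),
    ("whats my schedule", 4),
    ("what's on my calendar", 4),
    ("whats on my calendar", 4),
    ("do i have any meetings", 4),
    ("any meetings", 4),
    ("what's next on my calendar", 4),
    ("my schedule today", 4),
    ("what do i have today", 4),
    ("my calendar", 4),
    ("upcoming meetings", 4),
    ("next meeting", 4),
    ("what's my next meeting", 4),
    ("check my email", 5),
    ("check my mail", 5),
    ("any new emails", 5),
    ("any new mail", 5),
    ("unread emails", 5),
    ("unread mail", 5),
    ("what's in my inbox", 5),
    ("whats in my inbox", 5),
    ("read my email", 5),
    ("read my mail", 5),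
    ("any emails", 5),
    ("any mail", 5),
    ("email update", 5),
    ("mail update", 5),
    ("where are we", 6),
    ("where were we", 6),
    ("project status", 6),
    ("how's the build", 6),
    ("hows the build", 6),
    ("status update", 6),
    ("status report", 6),
    ("where is that", 6),
    ("how's it going with", 6),
    ("hows it going with", 6),
    ("is it done", 6),
    ("is that done", 6),
    ("what happened with", 6),
    ("what's on my list", 7),
    ("whats on my list", 7),
    ("my tasks", 7),
    ("my to do", 7),
    ("my todo", 7),
    ("what do i need to do", 7),
    ("open tasks", 7),
    ("task list", 7),
    ("usage", 8),
    ("how much have you cost", 8),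
    ("how much am i spending", 8),
    ("what's the cost", 8),
    ("whats the cost", 8),
    ("api cost", 8),
    ("token usage", 8),
    ("how expensive", 8),
    ("what's my bill", 8) ]

-- _ACTIONS
def pvActions : List String := ["describe_screen", "open_terminal", "show_recent", "describe_screen", "check_calendar", "check_mail", "check_dispatch", "check_tasks", "check_usage"]

def detect_action_fast_alt (text : String) : Option (List (String × String)) :=
  let t := PySem.Str.strip (PySem.Str.lower text)
  if (PySem.Str.split₀ t).length > 12 then none
  else
    let hits := (pvPriority.filter (fun pi => PySem.Str.isIn pi.1 t)).map Prod.snd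
    match PySem.List.min? hits (fun x => x) with
    | none => none
    | some i => some [("action", PySem.List.pyGetD pvActions (i : Int) "")]  -- _ACTIONS[min(hits)]; exact: every priority is < 9 = len(_ACTIONS)

-- ===== PRECONDITION & SPEC =====
def Spec_detect_action_fast (text : String) (out : Option (List (String × String))) : Prop := out = detect_action_fast_alt text
instance (text : String) (out : Option (List (String × String))) : Decidable (Spec_detect_action_fast text out) := by unfold Spec_detect_action_fast; infer_instance

-- ===== CLAIM (what is proved, stated in full; the proofs are below) =====
def Claim_equal_detect_action_fast : Prop := ∀ (text : String), Dom_detect_action_fast text → Spec_detect_action_fast text (detect_action_fast text)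

-- ===== LEMMAS AND PROOFS =====

-- the deduplicated pattern blocks (dict insertion order), one per original if-block
def pvBlocks : List (List String) :=
  [ ["look at my screen", "what's on my screen", "whats on my screen", "what am i looking at", "what do you see", "see my screen", "what's running on my", "whats running on my", "check my screen"],
    ["open claude", "start claude", "launch claude", "run claude"],
    ["show me what you built", "pull up what you made", "open what you built"],
    ["can you see my screen", "what's open", "whats open", "what apps are open"],
    ["what's my schedule", "whats my schedule", "what's on my calendar", "whats on my calendar", "do i have any meetings", "any meetings", "what's next on my calendar", "my schedule today", "what do i have today", "my calendar", "upcoming meetings", "next meeting", "what's my next meeting"],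
    ["check my email", "check my mail", "any new emails", "any new mail", "unread emails", "unread mail", "what's in my inbox", "whats in my inbox", "read my email", "read my mail", "any emails", "any mail", "email update", "mail update"],
    ["where are we", "where were we", "project status", "how's the build", "hows the build", "status update", "status report", "where is that", "how's it going with", "hows it going with", "is it done", "is that done", "what happened with"],
    ["what's on my list", "whats on my list", "my tasks", "my to do", "my todo", "what do i need to do", "open tasks", "task list"],
    ["usage", "how much have you cost", "how much am i spending", "what's the cost", "whats the cost", "api cost", "token usage", "how expensive", "what's my bill"] ]

-- tag each block's patterns with its index (the shape of the _PATTERN_PRIORITY dict)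
def pvTag : List (List String) → Nat → List (String × Nat)
  | [], _ => []
  | b :: bs, k => b.map (fun p => (p, k)) ++ pvTag bs (k + 1)

-- the list of priorities of matching patterns, block by block
def pvHits (t : String) : List (List String) → Nat → List Nat
  | [], _ => []
  | b :: bs, k => ((b.filter (fun p => PySem.Str.isIn p t)).map (fun _ => k)) ++ pvHits t bs (k + 1)

-- first-matching-block index (the reference chain both sides are reduced to)
def pvChain (t : String) : List (List String) → Nat → Option Nat
  | [], _ => none
  | b :: bs, k => if b.any (fun p => PySem.Str.isIn p t) then some k else pvChain t bs (k + 1)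

theorem pvPriority_eq_tag : pvPriority = pvTag pvBlocks 0 := by decide

theorem pv_filter_map_tag (t : String) (b : List String) (k : Nat) :
    ((b.map (fun p => (p, k))).filter (fun pi => PySem.Str.isIn pi.1 t)).map Prod.snd
      = (b.filter (fun p => PySem.Str.isIn p t)).map (fun _ => k) := by
  induction b with
  | nil => rfl
  | cons p b ih =>
      by_cases h : PySem.Str.isIn p t = true
      · simp only [List.map_cons, List.filter_cons, h, if_true, ih]
      · simp only [List.map_cons, List.filter_cons, h, if_false, Bool.false_eq_true, ih]

theorem pv_hits_eq (t : String) : ∀ (bs : List (List String)) (k : Nat),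
    ((pvTag bs k).filter (fun pi => PySem.Str.isIn pi.1 t)).map Prod.snd = pvHits t bs k := by
  intro bs
  induction bs with
  | nil => intro k; rfl
  | cons b bs ih =>
      intro k
      simp only [pvTag, pvHits, List.filter_append, List.map_append, pv_filter_map_tag, ih]

theorem pv_hits_lb (t : String) : ∀ (bs : List (List String)) (k : Nat),
    ∀ x ∈ pvHits t bs k, k ≤ x := by
  intro bs
  induction bs with
  | nil => intro k x hx; simp [pvHits] at hx
  | cons b bs ih =>
      intro k x hx
      simp only [pvHits, List.mem_append, List.mem_map] at hx
      rcases hx with ⟨_, _, rfl⟩ | hx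
      · exact le_refl k
      · exact Nat.le_of_succ_le (ih (k + 1) x hx)

theorem pv_min_hits (t : String) : ∀ (bs : List (List String)) (k : Nat),
    PySem.List.min? (pvHits t bs k) (fun x => x) = pvChain t bs k := by
  intro bs
  induction bs with
  | nil => intro k; rfl
  | cons b bs ih =>
      intro k
      simp only [pvHits, pvChain]
      by_cases h : b.any (fun p => PySem.Str.isIn p t)
      · simp only [h, if_true]
        -- the hit list is nonempty and k is its minimum
        rcases List.any_eq_true.mp h with ⟨p, hp, hpt⟩
        have hk : k ∈ (b.filter (fun p => PySem.Str.isIn p t)).map (fun _ => k) ++ pvHits t bs (k + 1) := by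
          refine List.mem_append_left _ ?_
          exact List.mem_map.mpr ⟨p, List.mem_filter.mpr ⟨hp, hpt⟩, rfl⟩
        have hne : ((b.filter (fun p => PySem.Str.isIn p t)).map (fun _ => k) ++ pvHits t bs (k + 1)) ≠ [] :=
          List.ne_nil_of_mem hk
        have hlb : ∀ x ∈ (b.filter (fun p => PySem.Str.isIn p t)).map (fun _ => k) ++ pvHits t bs (k + 1), k ≤ x := by
          intro x hx
          rcases List.mem_append.mp hx with hx | hx
          · rcases List.mem_map.mp hx with ⟨_, _, rfl⟩; exact le_refl k
          · exact Nat.le_of_succ_le (pv_hits_lb t bs (k + 1) x hx)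
        rcases Option.ne_none_iff_exists'.mp
          (fun hn : PySem.List.min? ((b.filter (fun p => PySem.Str.isIn p t)).map (fun _ => k) ++ pvHits t bs (k + 1)) (fun x => x) = none =>
            hne ((PySem.List.min?_eq_none_iff _ _).mp hn)) with ⟨m, hm⟩
        have h1 : k ≤ m := hlb m (PySem.List.min?_mem hm)
        have h2 : m ≤ k := PySem.List.min?_isMin hm k hk
        rw [hm, Nat.le_antisymm h2 h1]
      · simp only [h, Bool.false_eq_true, if_false]
        have hf : b.filter (fun p => PySem.Str.isIn p t) = [] :=
          List.filter_eq_nil_iff.mpr (fun p hp => by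
            have := List.any_eq_false.mp (Bool.eq_false_iff.mpr h) p hp
            simpa using this)
        rw [hf]
        simpa using ih (k + 1)

-- ===== VERDICT (by name: the statement is the Claim_ definition above) =====
theorem detect_action_fast_spec : Claim_equal_detect_action_fast := by
  intro text _
  unfold Spec_detect_action_fast detect_action_fast detect_action_fast_alt
  set t := PySem.Str.strip (PySem.Str.lower text) with ht
  by_cases hw : (PySem.Str.split₀ t).length > 12
  · simp [hw]
  · simp only [hw, if_false]
    rw [pvPriority_eq_tag, pv_hits_eq, pv_min_hits]
    simp only [pvBlocks, pvChain]
    by_cases h0 : (List.any ["look at my screen", "what's on my screen", "whats on my screen", "what am i looking at", "what do you see", "see my screen", "what's running on my", "whats running on my", "check my screen"] fun p => PySem.Str.isIn p t) = true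
    · simp only [h0, if_true]
      rfl
    have h0f : (List.any ["look at my screen", "what's on my screen", "whats on my screen", "what am i looking at", "what do you see", "see my screen", "what's running on my", "whats running on my", "check my screen"] fun p => PySem.Str.isIn p t) = false := by simpa using h0
    simp only [h0f, Bool.false_eq_true, if_false]
    by_cases h1 : (List.any ["open claude", "start claude", "launch claude", "run claude"] fun p => PySem.Str.isIn p t) = true
    · simp only [h1, if_true]
      rfl
    have h1f : (List.any ["open claude", "start claude", "launch claude", "run claude"] fun p => PySem.Str.isIn p t) = false := by simpa using h1
    simp only [h1f, Bool.false_eq_true, if_false]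
    by_cases h2 : (List.any ["show me what you built", "pull up what you made", "open what you built"] fun p => PySem.Str.isIn p t) = true
    · simp only [h2, if_true]
      rfl
    have h2f : (List.any ["show me what you built", "pull up what you made", "open what you built"] fun p => PySem.Str.isIn p t) = false := by simpa using h2
    simp only [h2f, Bool.false_eq_true, if_false]
    -- block 3 of A repeats five block-0 patterns; under h0f they are all false
    have hd := h0f
    simp only [List.any_cons, List.any_nil, Bool.or_eq_false_iff] at hd
    obtain ⟨d1, d2, d3, d4, d5, -⟩ := hd
    have heq : (List.any ["what's on my screen", "whats on my screen", "what do you see", "can you see my screen", "look at my screen", "what am i looking at", "what's open", "whats open", "what apps are open"] fun p => PySem.Str.isIn p t) = (List.any ["can you see my screen", "what's open", "whats open", "what apps are open"] fun p => PySem.Str.isIn p t) := by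
      simp only [List.any_cons, List.any_nil, d1, d2, d3, d4, d5, Bool.false_or]
    rw [heq]
    by_cases h3 : (List.any ["can you see my screen", "what's open", "whats open", "what apps are open"] fun p => PySem.Str.isIn p t) = true
    · simp only [h3, if_true]
      rfl
    have h3f : (List.any ["can you see my screen", "what's open", "whats open", "what apps are open"] fun p => PySem.Str.isIn p t) = false := by simpa using h3
    simp only [h3f, Bool.false_eq_true, if_false]
    by_cases h4 : (List.any ["what's my schedule", "whats my schedule", "what's on my calendar", "whats on my calendar", "do i have any meetings", "any meetings", "what's next on my calendar", "my schedule today", "what do i have today", "my calendar", "upcoming meetings", "next meeting", "what's my next meeting"] fun p => PySem.Str.isIn p t) = true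
    · simp only [h4, if_true]
      rfl
    have h4f : (List.any ["what's my schedule", "whats my schedule", "what's on my calendar", "whats on my calendar", "do i have any meetings", "any meetings", "what's next on my calendar", "my schedule today", "what do i have today", "my calendar", "upcoming meetings", "next meeting", "what's my next meeting"] fun p => PySem.Str.isIn p t) = false := by simpa using h4
    simp only [h4f, Bool.false_eq_true, if_false]
    by_cases h5 : (List.any ["check my email", "check my mail", "any new emails", "any new mail", "unread emails", "unread mail", "what's in my inbox", "whats in my inbox", "read my email", "read my mail", "any emails", "any mail", "email update", "mail update"] fun p => PySem.Str.isIn p t) = true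
    · simp only [h5, if_true]
      rfl
    have h5f : (List.any ["check my email", "check my mail", "any new emails", "any new mail", "unread emails", "unread mail", "what's in my inbox", "whats in my inbox", "read my email", "read my mail", "any emails", "any mail", "email update", "mail update"] fun p => PySem.Str.isIn p t) = false := by simpa using h5
    simp only [h5f, Bool.false_eq_true, if_false]
    by_cases h6 : (List.any ["where are we", "where were we", "project status", "how's the build", "hows the build", "status update", "status report", "where is that", "how's it going with", "hows it going with", "is it done", "is that done", "what happened with"] fun p => PySem.Str.isIn p t) = true
    · simp only [h6, if_true]
      rfl
    have h6f : (List.any ["where are we", "where were we", "project status", "how's the build", "hows the build", "status update", "status report", "where is that", "how's it going with", "hows it going with", "is it done", "is that done", "what happened with"] fun p => PySem.Str.isIn p t) = false := by simpa using h6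
    simp only [h6f, Bool.false_eq_true, if_false]
    by_cases h7 : (List.any ["what's on my list", "whats on my list", "my tasks", "my to do", "my todo", "what do i need to do", "open tasks", "task list"] fun p => PySem.Str.isIn p t) = true
    · simp only [h7, if_true]
      rfl
    have h7f : (List.any ["what's on my list", "whats on my list", "my tasks", "my to do", "my todo", "what do i need to do", "open tasks", "task list"] fun p => PySem.Str.isIn p t) = false := by simpa using h7
    simp only [h7f, Bool.false_eq_true, if_false]
    by_cases h8 : (List.any ["usage", "how much have you cost", "how much am i spending", "what's the cost", "whats the cost", "api cost", "token usage", "how expensive", "what's my bill"] fun p => PySem.Str.isIn p t) = true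
    · simp only [h8, if_true]
      rfl
    have h8f : (List.any ["usage", "how much have you cost", "how much am i spending", "what's the cost", "whats the cost", "api cost", "token usage", "how expensive", "what's my bill"] fun p => PySem.Str.isIn p t) = false := by simpa using h8
    simp only [h8f, Bool.false_eq_true, if_false]
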